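-- pv_equiv track=rewrite | github.com/jrobchin/AI-Royale | app/game.py | safe_check
-- ===== SOURCE A (Python) =====
-- def safe_check(check_string):
--     UNSAFE_CHARS = [';', '/', '?', ':', '@',
--                     '=', '&', '"', '<', '>',
--                     '#', '%', '{', '}', '|',
--                     '\\', '^', '~', '[', ']',
--                     '`']
--     for c in UNSAFE_CHARS:
--         if c in check_string:
--             return False
--     return True
-- ===== SOURCE B (Python) =====
-- _UNSAFE = frozenset(';/?:@=&"<>#%{}|\\^~[]`')
--
--
-- def safe_check(check_string):
--     for ch in check_string:
--         if ch in _UNSAFE: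
--             return False
--     return True
-- ===== Notes on version B (the rewrite author's own statement) =====
-- stated objective: alternative
-- what changed: B makes a single pass over the input string testing each character against a precomputed frozenset of the 21 unsafe characters, instead of A's 21 separate substring scans over the whole string; asymptotically one pass, though A's C-level scans are not slower in CPython.
import Mathlib
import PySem

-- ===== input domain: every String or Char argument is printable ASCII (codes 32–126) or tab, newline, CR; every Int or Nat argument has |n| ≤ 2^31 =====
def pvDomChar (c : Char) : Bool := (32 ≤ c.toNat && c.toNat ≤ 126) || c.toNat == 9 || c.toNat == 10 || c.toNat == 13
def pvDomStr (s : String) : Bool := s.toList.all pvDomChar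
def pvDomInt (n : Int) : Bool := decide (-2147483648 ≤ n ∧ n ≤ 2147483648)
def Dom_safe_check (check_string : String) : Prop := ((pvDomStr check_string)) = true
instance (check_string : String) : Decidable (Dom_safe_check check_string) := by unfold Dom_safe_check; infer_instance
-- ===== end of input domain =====

-- B replaces A's 21 substring scans by a single pass over the input with a set lookup (objective: alternative).


-- ===== PORT A =====
-- A's UNSAFE_CHARS list of one-character strings, literally
def pvUnsafeList : List String :=
  [";", "/", "?", ":", "@",
   "=", "&", "\"", "<", ">",
   "#", "%", "{", "}", "|",
   "\\", "^", "~", "[", "]",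
   "`"]

-- A's loop: for c in UNSAFE_CHARS: if c in check_string: return False; return True
def safeCheckLoopA : List String → String → Bool
  | [], _ => true
  | c :: rest, s => if PySem.Str.isIn c s then false else safeCheckLoopA rest s

def safe_check (check_string : String) : Bool :=
  safeCheckLoopA pvUnsafeList check_string

-- ===== PORT B =====
-- B's frozenset of the 21 unsafe characters, built once
def pvUnsafeSet : PySem.Set Char :=
  PySem.Set.ofList [';', '/', '?', ':', '@', '=', '&', '"', '<', '>',
                    '#', '%', '{', '}', '|', '\\', '^', '~', '[', ']', '`']

-- B's loop: for ch in check_string: if ch in _UNSAFE: return False; return True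
def safeCheckLoopB : List Char → Bool
  | [] => true
  | ch :: rest => if PySem.Set.contains pvUnsafeSet ch then false else safeCheckLoopB rest

def safe_check_alt (check_string : String) : Bool :=
  safeCheckLoopB check_string.toList

-- ===== PRECONDITION & SPEC =====
def Spec_safe_check (check_string : String) (out : Bool) : Prop := out = safe_check_alt check_string
instance (check_string : String) (out : Bool) : Decidable (Spec_safe_check check_string out) := by unfold Spec_safe_check; infer_instance

-- ===== CLAIM (what is proved, stated in full; the proofs are below) =====
def Claim_equal_safe_check : Prop := ∀ (check_string : String), Dom_safe_check check_string → Spec_safe_check check_string (safe_check check_string)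

-- ===== LEMMAS AND PROOFS =====

-- the chars underlying A's pattern list
def pvUnsafeChars : List Char :=
  [';', '/', '?', ':', '@', '=', '&', '"', '<', '>',
   '#', '%', '{', '}', '|', '\\', '^', '~', '[', ']', '`']

theorem pvUnsafeList_eq_map : pvUnsafeList = pvUnsafeChars.map (fun c => String.ofList [c]) := by
  decide

theorem single_infix {c : Char} {l : List Char} : [c] <:+: l ↔ c ∈ l := by
  constructor
  · intro h
    exact List.singleton_sublist.mp h.sublist
  · intro h
    obtain ⟨l1, l2, rfl⟩ := List.append_of_mem h
    exact ⟨l1, l2, by simp⟩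

theorem isIn_single (c : Char) (s : String) :
    PySem.Str.isIn (String.ofList [c]) s = s.toList.contains c := by
  rw [Bool.eq_iff_iff, PySem.Str.isIn_iff_infix,
    show (String.ofList [c]).toList = [c] by simp, single_infix]
  simp

theorem loopA_eq (cs : List Char) (s : String) :
    safeCheckLoopA (cs.map (fun c => String.ofList [c])) s
      = !(cs.any (fun c => s.toList.contains c)) := by
  induction cs with
  | nil => simp [safeCheckLoopA]
  | cons c rest ih =>
    simp only [List.map_cons, safeCheckLoopA, isIn_single, List.any_cons]
    cases h : s.toList.contains c with
    | true => simp
    | false => simp [ih]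

theorem contains_unsafeSet (c : Char) :
    PySem.Set.contains pvUnsafeSet c = pvUnsafeChars.contains c := by
  rw [Bool.eq_iff_iff, PySem.Set.contains_iff]
  show c ∈ pvUnsafeSet ↔ _
  rw [show pvUnsafeSet = PySem.Set.ofList pvUnsafeChars from rfl, PySem.Set.mem_ofList]
  simp

theorem loopB_eq (l : List Char) :
    safeCheckLoopB l = !(l.any (fun c => pvUnsafeChars.contains c)) := by
  induction l with
  | nil => simp [safeCheckLoopB]
  | cons c rest ih =>
    simp only [safeCheckLoopB, contains_unsafeSet, List.any_cons]
    cases h : pvUnsafeChars.contains c with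
    | true => simp
    | false => simp [ih]

theorem any_comm (cs l : List Char) :
    cs.any (fun c => l.contains c) = l.any (fun c => cs.contains c) := by
  rw [Bool.eq_iff_iff]
  simp only [List.any_eq_true, List.contains_iff_mem]
  exact ⟨fun ⟨c, h1, h2⟩ => ⟨c, h2, h1⟩, fun ⟨c, h1, h2⟩ => ⟨c, h2, h1⟩⟩

-- ===== VERDICT (by name: the statement is the Claim_ definition above) =====
theorem safe_check_spec : Claim_equal_safe_check := by
  intro s _
  unfold Spec_safe_check safe_check safe_check_alt
  rw [pvUnsafeList_eq_map, loopA_eq, loopB_eq, any_comm]
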